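-- pv_equiv track=rewrite | github.com/EL-BID/MapaInversiones | MapaInversiones.ChatBot/app/modules/graph/helpers_texto.py | _phrase_matches_catalog
-- ===== SOURCE A (Python) =====
-- def _phrase_matches_catalog(
--     phrase: str,
--     allowed_strings: set[str],
--     allowed_tokens: set[str],
-- ) -> bool:
--     """Verifica si una frase coincide con el catálogo permitido."""
--     if not phrase:
--         return False
--     if phrase in allowed_strings or phrase in allowed_tokens:
--         return True
--     for candidate in allowed_strings:
--         if phrase in candidate:
--             return True
--     if len(phrase.split()) > 1:
--         return all(
--             _phrase_matches_catalog(token, allowed_strings, allowed_tokens)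
--             for token in phrase.split()
--         )
--     return any(phrase in candidate for candidate in allowed_strings)
-- ===== SOURCE B (Python) =====
-- def _phrase_matches_catalog(
--     phrase: str,
--     allowed_strings: set[str],
--     allowed_tokens: set[str],
-- ) -> bool:
--     """Verifica si una frase coincide con el catálogo permitido."""
--
--     def matches_single(s: str) -> bool:
--         return (
--             s in allowed_strings
--             or s in allowed_tokens
--             or any(s in candidate for candidate in allowed_strings)
--         )
--
--     if not phrase:
--         return False
--     if matches_single(phrase):
--         return True
--     tokens = phrase.split()
--     if len(tokens) > 1:
--         return all(matches_single(t) for t in tokens)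
--     return False
-- ===== Notes on version B (the rewrite author's own statement) =====
-- stated objective: simpler
-- what changed: Replaces A's self-recursion (which is only ever one level deep, since whitespace-split tokens never split again) with a flat non-recursive helper matches_single, and drops A's redundant trailing substring scan (already performed by the preceding loop).
import Mathlib
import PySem

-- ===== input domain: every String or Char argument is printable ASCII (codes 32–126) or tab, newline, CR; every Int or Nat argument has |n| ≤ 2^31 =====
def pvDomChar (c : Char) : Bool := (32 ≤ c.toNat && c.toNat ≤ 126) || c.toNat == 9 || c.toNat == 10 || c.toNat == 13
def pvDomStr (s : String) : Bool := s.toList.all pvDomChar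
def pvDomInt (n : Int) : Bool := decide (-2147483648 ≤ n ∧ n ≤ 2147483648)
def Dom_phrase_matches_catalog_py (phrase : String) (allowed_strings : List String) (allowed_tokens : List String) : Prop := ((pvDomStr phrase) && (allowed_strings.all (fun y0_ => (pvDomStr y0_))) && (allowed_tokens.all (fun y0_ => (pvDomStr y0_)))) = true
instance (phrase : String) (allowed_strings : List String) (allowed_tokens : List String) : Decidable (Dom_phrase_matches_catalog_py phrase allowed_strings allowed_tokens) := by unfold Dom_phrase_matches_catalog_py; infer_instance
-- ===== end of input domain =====

-- B replaces A's one-level-deep self-recursion with a flat non-recursive helper and drops A's redundant trailing scan (objective: simpler).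

-- ===== PORT A =====
-- token-length lemma used by port A's termination proof (proved below the claim block would be too late; it stays here, cited by decreasing_by)
theorem pmc_go_infix (s cur : List Char) (acc : List (List Char)) :
    ∀ t ∈ PySem.Chars.split₀.go s cur acc, t ∈ acc ∨ t <:+: (cur.reverse ++ s) := by
  induction s generalizing cur acc with
  | nil =>
    intro t ht
    simp only [PySem.Chars.split₀.go] at ht
    split at ht
    · exact Or.inl (List.mem_reverse.mp ht)
    · rcases List.mem_cons.mp (List.mem_reverse.mp ht) with h | h
      · exact Or.inr (by simp [h])
      · exact Or.inl h
  | cons c rest ih =>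
    intro t ht
    simp only [PySem.Chars.split₀.go] at ht
    split at ht
    · split at ht
      · rcases ih _ _ t ht with h | h
        · exact Or.inl h
        · exact Or.inr ((show t <:+: rest by simpa using h).trans ⟨cur.reverse ++ [c], [], by simp⟩)
      · rcases ih _ _ t ht with h | h
        · rcases List.mem_cons.mp h with h | h
          · exact Or.inr (by rw [h]; exact ⟨[], c :: rest, by simp⟩)
          · exact Or.inl h
        · exact Or.inr ((show t <:+: rest by simpa using h).trans ⟨cur.reverse ++ [c], [], by simp⟩)
    · rcases ih _ _ t ht with h | h
      · exact Or.inl h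
      · exact Or.inr (by simpa [List.append_assoc] using h)

theorem pmc_go_len (s cur : List Char) (acc : List (List Char)) (hs : ∀ c ∈ s, PySem.Chars.isspace c = false) :
    (PySem.Chars.split₀.go s cur acc).length ≤ acc.length + 1 := by
  induction s generalizing cur acc with
  | nil =>
    simp only [PySem.Chars.split₀.go]
    split <;> simp
  | cons c rest ih =>
    simp only [PySem.Chars.split₀.go]
    have hc : PySem.Chars.isspace c = false := hs c (by simp)
    rw [hc, if_neg Bool.false_ne_true]
    exact ih _ _ (fun d hd => hs d (by simp [hd]))

theorem pmc_go_nonascii (s cur : List Char) (acc : List (List Char))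
    (hacc : ∀ t ∈ acc, t ≠ [] ∧ ∀ c ∈ t, PySem.Chars.isspace c = false)
    (hcur : ∀ c ∈ cur, PySem.Chars.isspace c = false) :
    ∀ t ∈ PySem.Chars.split₀.go s cur acc, t ≠ [] ∧ ∀ c ∈ t, PySem.Chars.isspace c = false := by
  induction s generalizing cur acc with
  | nil =>
    intro t ht
    simp only [PySem.Chars.split₀.go] at ht
    split at ht
    · exact hacc t (List.mem_reverse.mp ht)
    · rcases List.mem_cons.mp (List.mem_reverse.mp ht) with h | h
      · subst h
        rename_i hne
        constructor
        · simp only [List.isEmpty_iff] at hne; simpa using hne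
        · intro c hc; exact hcur c (List.mem_reverse.mp hc)
      · exact hacc t h
  | cons c rest ih =>
    intro t ht
    simp only [PySem.Chars.split₀.go] at ht
    split at ht
    · split at ht
      · exact ih _ _ hacc (by simp) t ht
      · refine ih _ _ ?_ (by simp) t ht
        intro u hu
        rcases List.mem_cons.mp hu with h | h
        · subst h
          rename_i hne
          refine ⟨?_, fun d hd => hcur d (List.mem_reverse.mp hd)⟩
          simp only [List.isEmpty_iff] at hne; simpa using hne
        · exact hacc u h
    · rename_i hcws
      refine ih _ _ hacc ?_ t ht
      intro d hd
      rcases List.mem_cons.mp hd with h | h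
      · subst h; simpa using hcws
      · exact hcur d h

theorem pmc_token_len {t s : List Char} (ht : t ∈ PySem.Chars.split₀ s)
    (hmany : 1 < (PySem.Chars.split₀ s).length) : t.length < s.length := by
  have hinfix : t <:+: s := by
    rcases pmc_go_infix s [] [] t ht with h | h
    · simp at h
    · simpa using h
  have hle : t.length ≤ s.length := hinfix.length_le
  rcases Nat.lt_or_ge t.length s.length with h | h
  · exact h
  · exfalso
    have heq : t = s := hinfix.sublist.eq_of_length (Nat.le_antisymm hle h)
    subst heq
    -- t = s is whitespace-free, so split₀ s has at most one element
    have hws : ∀ c ∈ t, PySem.Chars.isspace c = false :=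
      (pmc_go_nonascii t [] [] (by simp) (by simp) t ht).2
    have := pmc_go_len t [] [] hws
    simp only [List.length_nil] at this
    have : (PySem.Chars.split₀ t).length ≤ 1 := by simpa [PySem.Chars.split₀] using this
    omega

theorem pmc_token_len_str {t phrase : String} (ht : t ∈ PySem.Str.split₀ phrase)
    (hmany : 1 < (PySem.Str.split₀ phrase).length) : t.toList.length < phrase.toList.length := by
  simp only [PySem.Str.split₀, List.mem_map] at ht
  rcases ht with ⟨u, hu, rfl⟩
  have : (PySem.Chars.split₀ phrase.toList).length > 1 := by
    simpa [PySem.Str.split₀] using hmany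
  simpa using pmc_token_len hu this

def phrase_matches_catalog_py (phrase : String) (allowed_strings : List String) (allowed_tokens : List String) : Bool :=
  if phrase.isEmpty then false
  else if allowed_strings.contains phrase || allowed_tokens.contains phrase then true
  else if allowed_strings.any (fun candidate => PySem.Str.isIn phrase candidate) then true
  else if (PySem.Str.split₀ phrase).length > 1 then
    (PySem.Str.split₀ phrase).attach.all
      (fun ⟨token, _⟩ => phrase_matches_catalog_py token allowed_strings allowed_tokens)
  else allowed_strings.any (fun candidate => PySem.Str.isIn phrase candidate)
termination_by phrase.toList.length
decreasing_by
  exact pmc_token_len_str (by assumption) (by omega)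

-- ===== PORT B =====
def pmcMatchesSingle (s : String) (allowed_strings : List String) (allowed_tokens : List String) : Bool :=
  allowed_strings.contains s || allowed_tokens.contains s
    || allowed_strings.any (fun candidate => PySem.Str.isIn s candidate)

def phrase_matches_catalog_py_alt (phrase : String) (allowed_strings : List String) (allowed_tokens : List String) : Bool :=
  if phrase.isEmpty then false
  else if pmcMatchesSingle phrase allowed_strings allowed_tokens then true
  else
    let tokens := PySem.Str.split₀ phrase
    if tokens.length > 1 then
      tokens.all (fun t => pmcMatchesSingle t allowed_strings allowed_tokens)
    else false


-- ===== PRECONDITION & SPEC =====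
def Spec_phrase_matches_catalog_py (phrase : String) (allowed_strings : List String) (allowed_tokens : List String) (out : Bool) : Prop := out = phrase_matches_catalog_py_alt phrase allowed_strings allowed_tokens
instance (phrase : String) (allowed_strings : List String) (allowed_tokens : List String) (out : Bool) : Decidable (Spec_phrase_matches_catalog_py phrase allowed_strings allowed_tokens out) := by unfold Spec_phrase_matches_catalog_py; infer_instance

-- ===== CLAIM (what is proved, stated in full; the proofs are below) =====
def Claim_equal_phrase_matches_catalog_py : Prop := ∀ (phrase : String) (allowed_strings : List String) (allowed_tokens : List String), Dom_phrase_matches_catalog_py phrase allowed_strings allowed_tokens → Spec_phrase_matches_catalog_py phrase allowed_strings allowed_tokens (phrase_matches_catalog_py phrase allowed_strings allowed_tokens)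

-- ===== LEMMAS AND PROOFS =====

theorem pmc_go_word (s cur : List Char) (acc : List (List Char)) (hs : ∀ c ∈ s, PySem.Chars.isspace c = false) :
    PySem.Chars.split₀.go s cur acc = PySem.Chars.split₀.go [] (s.reverse ++ cur) acc := by
  induction s generalizing cur with
  | nil => simp
  | cons c rest ih =>
    have hc : PySem.Chars.isspace c = false := hs c (by simp)
    rw [show PySem.Chars.split₀.go (c :: rest) cur acc
          = if PySem.Chars.isspace c = true then
              (if cur.isEmpty then PySem.Chars.split₀.go rest [] acc
               else PySem.Chars.split₀.go rest [] (cur.reverse :: acc))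
            else PySem.Chars.split₀.go rest (c :: cur) acc from rfl,
        hc, if_neg Bool.false_ne_true]
    rw [ih (c :: cur) (fun d hd => hs d (by simp [hd]))]
    simp [List.append_assoc]

-- a nonempty whitespace-free word splits into itself alone
theorem pmc_split_word (s : List Char) (hne : s ≠ [])
    (hs : ∀ c ∈ s, PySem.Chars.isspace c = false) :
    PySem.Chars.split₀ s = [s] := by
  have := pmc_go_word s [] [] hs
  simp only [PySem.Chars.split₀] at *
  rw [this]
  simp only [PySem.Chars.split₀.go, List.append_nil]
  rw [if_neg (by simpa using hne)]
  simp

-- facts about a token of a string's whitespace split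
theorem pmc_token_facts {t : String} {phrase : String} (ht : t ∈ PySem.Str.split₀ phrase) :
    t.isEmpty = false ∧ PySem.Str.split₀ t = [t] := by
  simp only [PySem.Str.split₀, List.mem_map] at ht
  rcases ht with ⟨u, hu, rfl⟩
  have hfacts := pmc_go_nonascii phrase.toList [] [] (by simp) (by simp) u hu
  have htl : (String.ofList u).toList = u := by simp
  constructor
  · rw [Bool.eq_false_iff]
    intro hc
    apply hfacts.1
    have h2 := htl
    rw [String.isEmpty_iff.mp hc] at h2
    simpa using h2.symm
  · simp only [PySem.Str.split₀, htl]
    rw [pmc_split_word u hfacts.1 hfacts.2]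
    simp

-- on a single whitespace-free token, port A reduces to port B's flat helper
theorem pmc_A_token {t : String} {phrase : String} (ht : t ∈ PySem.Str.split₀ phrase)
    (allowed_strings allowed_tokens : List String) :
    phrase_matches_catalog_py t allowed_strings allowed_tokens
      = pmcMatchesSingle t allowed_strings allowed_tokens := by
  obtain ⟨hne, hsplit⟩ := pmc_token_facts ht
  have hlen : ¬ ((PySem.Str.split₀ t).length > 1) := by rw [hsplit]; simp
  rw [phrase_matches_catalog_py, if_neg (by simp [hne])]
  by_cases h1 : (allowed_strings.contains t || allowed_tokens.contains t) = true
  · rw [if_pos h1, pmcMatchesSingle, h1, Bool.true_or]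
  · rw [if_neg h1]
    have e1 := Bool.eq_false_iff.mpr h1
    by_cases h2 : (allowed_strings.any fun candidate => PySem.Str.isIn t candidate) = true
    · rw [if_pos h2, pmcMatchesSingle, e1, h2, Bool.false_or]
    · have e2 := Bool.eq_false_iff.mpr h2
      rw [if_neg h2, if_neg hlen, pmcMatchesSingle, e1, e2, Bool.false_or]

theorem pmc_main (phrase : String) (allowed_strings allowed_tokens : List String) :
    phrase_matches_catalog_py phrase allowed_strings allowed_tokens
      = phrase_matches_catalog_py_alt phrase allowed_strings allowed_tokens := by
  rw [phrase_matches_catalog_py]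
  simp only [phrase_matches_catalog_py_alt]
  by_cases h0 : phrase.isEmpty = true
  · rw [if_pos h0, if_pos h0]
  · rw [if_neg h0, if_neg h0]
    by_cases h1 : (allowed_strings.contains phrase || allowed_tokens.contains phrase) = true
    · rw [if_pos h1, if_pos (show pmcMatchesSingle phrase allowed_strings allowed_tokens = true by
        rw [pmcMatchesSingle, h1, Bool.true_or])]
    · have e1 := Bool.eq_false_iff.mpr h1
      rw [if_neg h1]
      by_cases h2 : (allowed_strings.any fun candidate => PySem.Str.isIn phrase candidate) = true
      · rw [if_pos h2, if_pos (show pmcMatchesSingle phrase allowed_strings allowed_tokens = true by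
          rw [pmcMatchesSingle, e1, h2, Bool.false_or])]
      · have e2 := Bool.eq_false_iff.mpr h2
        rw [if_neg h2, if_neg (show ¬ pmcMatchesSingle phrase allowed_strings allowed_tokens = true by
          rw [pmcMatchesSingle, e1, e2]; simp)]
        by_cases h3 : (PySem.Str.split₀ phrase).length > 1
        · rw [if_pos h3, if_pos h3]
          rw [Bool.eq_iff_iff, List.all_eq_true, List.all_eq_true]
          constructor
          · intro h t ht
            rw [← pmc_A_token ht allowed_strings allowed_tokens]
            exact h ⟨t, ht⟩ (List.mem_attach _ _)
          · intro h x _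
            rw [pmc_A_token x.2 allowed_strings allowed_tokens]
            exact h x.1 x.2
        · rw [if_neg h3, if_neg h3]
          exact e2

-- ===== VERDICT (by name: the statement is the Claim_ definition above) =====
theorem phrase_matches_catalog_py_spec : Claim_equal_phrase_matches_catalog_py := by
  intro phrase allowed_strings allowed_tokens _
  unfold Spec_phrase_matches_catalog_py
  exact pmc_main phrase allowed_strings allowed_tokens
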